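-- pv_equiv track=rewrite | github.com/lupnor5/laughing-computing-machine | recursion/phrases_other_method.py | phrases
-- ===== SOURCE A (Python) =====
-- def phrases(arr, i = 0):
--     if i== len(arr):
--         return ['']
--     else:
--         fromNext = phrases(arr, i+1)
--         output = []
--         for word in arr[i]:
--             for phrase in fromNext:
--                 output.append(word + (' ' if len(phrase) > 0 else '') + phrase)
--         return output
-- ===== SOURCE B (Python) =====
-- def phrases(arr, i = 0):
--     # Bottom-up iterative version: fold the rows from the last one down to
--     # index i, extending every accumulated suffix phrase with each word.
--     result = ['']
--     idx = len(arr) - 1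
--     while idx >= i:
--         row = arr[idx]
--         result = [word + (' ' if len(phrase) > 0 else '') + phrase
--                   for word in row for phrase in result]
--         idx -= 1
--     return result
-- ===== Notes on version B (the rewrite author's own statement) =====
-- stated objective: simpler
-- what changed: Replaced the recursion over the suffix index with an explicit bottom-up while loop that folds the rows from the last index down to i, maintaining the list of suffix phrases.
import Mathlib
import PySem

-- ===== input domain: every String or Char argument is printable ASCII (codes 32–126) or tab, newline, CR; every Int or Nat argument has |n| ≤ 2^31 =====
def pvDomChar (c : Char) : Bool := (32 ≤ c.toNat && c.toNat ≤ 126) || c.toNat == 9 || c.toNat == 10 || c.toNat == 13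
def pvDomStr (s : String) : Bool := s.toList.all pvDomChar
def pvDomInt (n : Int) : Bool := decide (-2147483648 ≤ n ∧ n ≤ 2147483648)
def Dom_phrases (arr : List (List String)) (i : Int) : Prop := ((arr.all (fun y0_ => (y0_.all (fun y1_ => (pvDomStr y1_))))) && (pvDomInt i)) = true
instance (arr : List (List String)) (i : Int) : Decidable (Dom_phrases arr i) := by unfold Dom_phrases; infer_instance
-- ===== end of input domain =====

-- B replaces A's recursion with an explicit bottom-up loop over the row indices
-- (same output, same order); equivalence is about the return value, no mutation.

-- ===== PORT A =====
-- Recursive: phrases(arr, i) combines each word of arr[i] with every phrase of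
-- phrases(arr, i+1).  The Nat fuel only makes the recursion total (it is ample
-- whenever i <= len(arr); Python raises RecursionError for i > len(arr)).
def phrasesGo (arr : List (List String)) : Nat → Int → List String
  | 0, _ => []
  | fuel + 1, i =>
    if i = (arr.length : Int) then [""]
    else
      let fromNext := phrasesGo arr fuel (i + 1)
      match PySem.List.pyGet? arr i with
      | some row =>
          row.foldl (fun output word =>
            fromNext.foldl (fun output phrase =>
              output ++ [word ++ (if 0 < PySem.Str.len phrase then " " else "") ++ phrase]) output) []
      | none => []   -- Python raises IndexError here (i < -len(arr)); outside Pre_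

def phrases (arr : List (List String)) (i : Int) : List String :=
  phrasesGo arr (((arr.length : Int) - i).toNat + 1) i

-- ===== PORT B =====
-- one loop iteration: result = [word + sep + phrase for word in row for phrase in result]
def phrasesStep (result : List String) (row : List String) : List String :=
  row.flatMap (fun word =>
    result.map (fun phrase => word ++ (if 0 < PySem.Str.len phrase then " " else "") ++ phrase))

-- the while loop: idx counts down from len(arr)-1 to i; the Nat fuel only makes
-- the loop total (it is ample: the loop runs at most (len(arr) - i) times)
def phrasesLoopGo (arr : List (List String)) : Nat → Int → Int → List String → List String
  | 0, _, _, result => result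
  | fuel + 1, i, idx, result =>
    if i ≤ idx then
      match PySem.List.pyGet? arr idx with
      | some row => phrasesLoopGo arr fuel i (idx - 1) (phrasesStep result row)
      | none => []   -- Python raises IndexError here (idx < -len(arr)); outside Pre_
    else result

def phrases_alt (arr : List (List String)) (i : Int) : List String :=
  phrasesLoopGo arr ((arr.length : Int) - i).toNat i ((arr.length : Int) - 1) [""]

-- ===== PRECONDITION & SPEC =====
-- Pre_ is exactly where the Python A returns: for i > len(arr) it raises
-- RecursionError, for i < -len(arr) it raises IndexError.
def Pre_phrases (arr : List (List String)) (i : Int) : Prop :=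
  -(arr.length : Int) ≤ i ∧ i ≤ (arr.length : Int)
instance (arr : List (List String)) (i : Int) : Decidable (Pre_phrases arr i) := by
  unfold Pre_phrases; infer_instance

def pvWitness_phrases : List (List String) × Int := ([["hi", "there"], ["world"]], 0)

def Spec_phrases (arr : List (List String)) (i : Int) (out : List String) : Prop := out = phrases_alt arr i
instance (arr : List (List String)) (i : Int) (out : List String) : Decidable (Spec_phrases arr i out) := by unfold Spec_phrases; infer_instance

-- ===== CLAIM (what is proved, stated in full; the proofs are below) =====
def Claim_equal_phrases : Prop := ∀ (arr : List (List String)) (i : Int), Dom_phrases arr i → Pre_phrases arr i → Spec_phrases arr i (phrases arr i)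

-- ===== LEMMAS AND PROOFS =====

-- A's nested append-loop equals B's comprehension (flatMap of map)
theorem step_eq (row res : List String) :
    row.foldl (fun output word =>
      res.foldl (fun output phrase =>
        output ++ [word ++ (if 0 < PySem.Str.len phrase then " " else "") ++ phrase]) output) []
    = phrasesStep res row := by
  unfold phrasesStep
  simp only [PySem.List.foldl_append_singleton_eq_map]
  rw [PySem.List.foldl_append_eq_flatMap]
  simp

-- the fuel of phrasesGo is irrelevant as long as it is ample
theorem go_congr (arr : List (List String)) :
    ∀ (f1 f2 : Nat) (i : Int), ((arr.length : Int) - i).toNat < f1 →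
      ((arr.length : Int) - i).toNat < f2 → phrasesGo arr f1 i = phrasesGo arr f2 i := by
  intro f1
  induction f1 with
  | zero => intro f2 i h1 _; omega
  | succ n ih =>
    intro f2 i h1 h2
    match f2, h2 with
    | m + 1, _ =>
      by_cases hi : i = (arr.length : Int)
      · simp only [phrasesGo, if_pos hi]
      · by_cases hlt : i < (arr.length : Int)
        · simp only [phrasesGo, if_neg hi]
          rw [ih m (i + 1) (by omega) (by omega)]
        · have hnone : PySem.List.pyGet? arr i = none :=
            (PySem.List.pyGet?_eq_none_iff _ _).mpr
              (by simp [PySem.Raise.InRange]; omega)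
          simp only [phrasesGo, if_neg hi, hnone]

-- loop invariant: once the suffix from idx+1 has been folded into the result,
-- finishing the loop down to i yields phrases arr i
theorem loop_inv (arr : List (List String)) (i : Int) :
    ∀ (fuel : Nat) (idx : Int), (idx - i + 1).toNat ≤ fuel →
      -(arr.length : Int) ≤ i → idx < (arr.length : Int) → i ≤ idx + 1 →
      phrasesLoopGo arr fuel i idx (phrases arr (idx + 1)) = phrases arr i := by
  intro fuel
  induction fuel with
  | zero =>
    intro idx hf hlo hub hle
    have : i = idx + 1 := by omega
    simp only [phrasesLoopGo, this]
  | succ n ih =>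
    intro idx hf hlo hub hle
    by_cases hcase : i ≤ idx
    · rcases hget : PySem.List.pyGet? arr idx with _ | row
      · have hnin := (PySem.List.pyGet?_eq_none_iff _ _).mp hget
        simp [PySem.Raise.InRange] at hnin
        omega
      · simp only [phrasesLoopGo, if_pos hcase, hget]
        have hA : phrases arr idx = phrasesStep (phrases arr (idx + 1)) row := by
          have hne : idx ≠ (arr.length : Int) := by omega
          simp only [phrases, phrasesGo, if_neg hne, hget]
          rw [go_congr arr (((arr.length : Int) - idx).toNat) (((arr.length : Int) - (idx + 1)).toNat + 1) (idx + 1) (by omega) (by omega)]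
          exact step_eq row (phrasesGo arr (((arr.length : Int) - (idx + 1)).toNat + 1) (idx + 1))
        rw [← hA]
        have := ih (idx - 1) (by omega) hlo (by omega) (by omega)
        simpa using this
    · have hsi : i = idx + 1 := by omega
      subst hsi
      simp only [phrasesLoopGo, if_neg hcase]

-- ===== VERDICT (by name: the statement is the Claim_ definition above) =====
theorem phrases_spec : Claim_equal_phrases := by
  intro arr i _hdom hpre
  rcases hpre with ⟨hlo, hhi⟩
  unfold Spec_phrases phrases_alt
  have hbase : phrases arr ((arr.length : Int) - 1 + 1) = [""] := by
    have h : ((arr.length : Int) - 1 + 1) = (arr.length : Int) := by omega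
    rw [h]
    simp [phrases, phrasesGo]
  rw [← loop_inv arr i ((arr.length : Int) - i).toNat ((arr.length : Int) - 1) (by omega) hlo (by omega) (by omega), hbase]
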